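-- pv_equiv track=rewrite | github.com/Lakshmi-Sayyapureddy1819/medical_ocr | app/pii_extractor.py | _pick_best_age
-- ===== SOURCE A (Python) =====
-- from typing import Dict, Any, List
--
-- def _pick_best_age(cands: List[str]) -> str | None:
--     # prefer 2-digit ages between 10 and 100
--     nums = []
--     for c in cands:
--         try:
--             v = int(c)
--             nums.append(v)
--         except ValueError:
--             continue
--     # sort by "goodness": 2-digit & in adult range first
--     nums_sorted = sorted(nums, key=lambda x: (not (10 <= x <= 100), abs(x-30)))
--     return str(nums_sorted[0]) if nums_sorted else None
-- ===== SOURCE B (Python) =====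
-- def _pick_best_age(cands):
--     # one pass: running argmin over the Python key (not (10<=v<=100), abs(v-30));
--     # strict '<' keeps the earliest candidate on ties, like the stable sort's head
--     best = None
--     best_key = None
--     for c in cands:
--         try:
--             v = int(c)
--         except ValueError:
--             continue
--         k = (not (10 <= v <= 100), abs(v - 30))
--         if best is None or k < best_key:
--             best, best_key = v, k
--     return str(best) if best is not None else None
-- ===== Notes on version B (the rewrite author's own statement) =====
-- stated objective: alternative
-- what changed: Replaces build-list + sort-by-key + take-head with a single pass that keeps a running argmin (strict '<' on the key tuple preserves the stable sort's first-minimal tie-breaking), so no intermediate list and no sort; fewer operations asymptotically (O(n) vs O(n log n)) but CPython's C-level sort makes wall-clock comparable.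
import Mathlib
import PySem

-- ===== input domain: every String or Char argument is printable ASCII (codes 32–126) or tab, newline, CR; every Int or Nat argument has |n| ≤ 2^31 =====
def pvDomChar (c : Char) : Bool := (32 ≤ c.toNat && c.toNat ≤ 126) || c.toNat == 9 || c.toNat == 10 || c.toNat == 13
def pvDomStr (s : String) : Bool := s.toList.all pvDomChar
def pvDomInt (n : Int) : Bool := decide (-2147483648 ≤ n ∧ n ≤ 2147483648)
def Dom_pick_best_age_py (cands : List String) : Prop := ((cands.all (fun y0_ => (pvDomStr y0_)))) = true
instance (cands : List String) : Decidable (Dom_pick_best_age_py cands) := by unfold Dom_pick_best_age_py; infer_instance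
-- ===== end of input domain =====

-- B replaces A's build-list + stable sort + take-head by a single running-argmin pass (alternative decomposition, no sort).

-- Python's sort key (not (10 <= x <= 100), abs(x - 30)): a tuple compared lexicographically,
-- with False < True — exactly the Lex order on Bool × Int.
def pvAgeKey (x : Int) : Lex (Bool × Int) := toLex (!(decide (10 ≤ x ∧ x ≤ 100)), |x - 30|)

-- ===== PORT A =====
def pick_best_age_py (cands : List String) : Option String :=
  let nums := cands.foldl (fun acc c =>
    match PySem.Int.ofStr? c with
    | some v => acc ++ [v]          -- nums.append(v)
    | none   => acc) []             -- except ValueError: continue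
  let nums_sorted := PySem.List.sorted nums pvAgeKey
  match nums_sorted with
  | []     => none
  | m :: _ => some (PySem.Int.toStr m)

-- ===== PORT B =====
def pick_best_age_py_alt (cands : List String) : Option String :=
  (cands.foldl (fun best c =>
    match PySem.Int.ofStr? c with
    | none   => best                -- skip non-ints
    | some v =>
      match best with
      | none   => some v
      | some b => if pvAgeKey v < pvAgeKey b then some v else best) none).map PySem.Int.toStr

-- ===== PRECONDITION & SPEC =====
def Spec_pick_best_age_py (cands : List String) (out : Option String) : Prop := out = pick_best_age_py_alt cands
instance (cands : List String) (out : Option String) : Decidable (Spec_pick_best_age_py cands out) := by unfold Spec_pick_best_age_py; infer_instance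

-- ===== CLAIM (what is proved, stated in full; the proofs are below) =====
def Claim_equal_pick_best_age_py : Prop := ∀ (cands : List String), Dom_pick_best_age_py cands → Spec_pick_best_age_py cands (pick_best_age_py cands)

-- ===== LEMMAS AND PROOFS =====

-- B's loop step, on the already-parsed integer
def pvStep (best : Option Int) (v : Int) : Option Int :=
  match best with
  | none   => some v
  | some b => if pvAgeKey v < pvAgeKey b then some v else best

-- inserting into a key-sorted list changes the head exactly as the argmin step does
theorem pv_head_insertBy (x : Int) (l : List Int) :
    (PySem.List.insertBy (fun a b => decide (pvAgeKey a < pvAgeKey b)) x l).head?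
      = pvStep l.head? x := by
  cases l with
  | nil => simp [PySem.List.insertBy, pvStep]
  | cons h t =>
    simp only [PySem.List.insertBy, pvStep]
    by_cases hc : pvAgeKey x < pvAgeKey h <;> simp [hc]

-- the head of the insertion-sort fold is the argmin fold
theorem pv_head_foldl_insertBy (ns : List Int) (acc : List Int) :
    ((ns.foldl (fun a x => PySem.List.insertBy (fun a b => decide (pvAgeKey a < pvAgeKey b)) x a) acc).head?)
      = ns.foldl pvStep acc.head? := by
  induction ns generalizing acc with
  | nil => rfl
  | cons n t ih => simp only [List.foldl_cons, ih, pv_head_insertBy]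

-- A's nums-building loop is a filterMap
theorem pv_nums_eq_filterMap (cands : List String) (acc : List Int) :
    cands.foldl (fun acc c =>
      match PySem.Int.ofStr? c with
      | some v => acc ++ [v]
      | none   => acc) acc = acc ++ cands.filterMap PySem.Int.ofStr? := by
  induction cands generalizing acc with
  | nil => simp
  | cons c t ih =>
    cases h : PySem.Int.ofStr? c <;> simp [h, ih]

-- B's loop over the strings is the argmin fold over the parsed integers
theorem pv_alt_fold_eq (cands : List String) (b : Option Int) :
    cands.foldl (fun best c =>
      match PySem.Int.ofStr? c with
      | none   => best
      | some v => pvStep best v) b = (cands.filterMap PySem.Int.ofStr?).foldl pvStep b := by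
  induction cands generalizing b with
  | nil => rfl
  | cons c t ih =>
    cases h : PySem.Int.ofStr? c <;> simp [h, ih]

-- ===== VERDICT (by name: the statement is the Claim_ definition above) =====
theorem pick_best_age_py_spec : Claim_equal_pick_best_age_py := by
  intro cands _
  unfold Spec_pick_best_age_py pick_best_age_py pick_best_age_py_alt
  simp only [pv_nums_eq_filterMap, List.nil_append,
    PySem.List.sorted_eq_foldl_insertBy]
  have hb := pv_alt_fold_eq cands none
  simp only [pvStep] at hb
  rw [hb]
  have := pv_head_foldl_insertBy (cands.filterMap PySem.Int.ofStr?) []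
  simp only [List.head?_nil] at this
  rw [← this]
  cases hs : ((cands.filterMap PySem.Int.ofStr?).foldl
      (fun a x => PySem.List.insertBy (fun a b => decide (pvAgeKey a < pvAgeKey b)) x a) []) <;>
    simp
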